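-- pv_equiv track=rewrite | github.com/ikeshou/Kyoupuro_library_python | src/mypkg/graphs/traverse/bridge_joint.py | contract_from_cycle
-- ===== SOURCE A (Python) =====
-- from typing import Sequence, Set, List, Tuple
--
-- def contract_from_cycle(bridge: List[List[int]], cycle_graph: List[Set[int]]) -> Tuple[List[int], List[List[int]]]:
--     """
--     O(V+E) で二重連結成分分解を行う
--
--     Args:
--         bridge (list): 橋を示すリスト。edge(u, v) が橋である時 (u, v) がこのリストに追加される
--         cycle_graph (list): cycle_graph[i] には i と '直接つながる' 二重連結成分が set で入っているリスト
--
--     Returns: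
--         vertex_to_group_num (list): vertex_to_group_num[i] には i がどのグループ番号で表されるグループに属するかが int で入っているリスト
--         bi_connected (list): 二重連結成分ごとにグルーピングを行った時、そのグループ番号で表現された隣接リスト
--     """
--     n = len(cycle_graph)
--     visited = [False] * n
--     vertex_to_group_num = [-1] * n
--     def dfs(u, group_num):
--         ' u と同じ二重連結成分に属する頂点全てに num なるグルーピングを施す。'
--         visited[u] = True
--         vertex_to_group_num[u] = group_num
--         for v in cycle_graph[u]:
--             if not visited[v]:
--                 dfs(v, group_num)
--     # 実際に二重連結成分単位でグルーピング
--     cnt = -1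
--     for u in range(n):
--         if not visited[u]:
--             cnt += 1
--             dfs(u, cnt)
--     # そのグループ番号を新たなノードだとみなしたときの隣接リストを作る
--     bi_connected = [[] for _ in range(cnt + 1)]
--     for u, v in bridge:
--         bi_connected[vertex_to_group_num[u]].append(vertex_to_group_num[v])
--         bi_connected[vertex_to_group_num[v]].append(vertex_to_group_num[u])
--     return vertex_to_group_num, bi_connected
-- ===== SOURCE B (Python) =====
-- def contract_from_cycle(bridge, cycle_graph):
--     n = len(cycle_graph)
--     visited = [False] * n
--     vertex_to_group_num = [-1] * n
--     cnt = -1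
--     for s in range(n):
--         if visited[s]:
--             continue
--         cnt += 1
--         visited[s] = True
--         vertex_to_group_num[s] = cnt
--         stack = [iter(cycle_graph[s])]
--         while stack:
--             for v in stack[-1]:
--                 if not visited[v]:
--                     visited[v] = True
--                     vertex_to_group_num[v] = cnt
--                     stack.append(iter(cycle_graph[v]))
--                     break
--             else:
--                 stack.pop()
--     bi_connected = [[] for _ in range(cnt + 1)]
--     for u, v in bridge:
--         bi_connected[vertex_to_group_num[u]].append(vertex_to_group_num[v])
--         bi_connected[vertex_to_group_num[v]].append(vertex_to_group_num[u])
--     return vertex_to_group_num, bi_connected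
-- ===== Notes on version B (the rewrite author's own statement) =====
-- stated objective: alternative
-- what changed: A's recursive dfs helper is replaced by an iterative depth-first flood fill driven by an explicit stack of neighbour iterators (while stack: advance top iterator, mark-and-push unvisited neighbours, pop exhausted iterators); the outer component loop and the bridge-contraction loop are unchanged.
import Mathlib
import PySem

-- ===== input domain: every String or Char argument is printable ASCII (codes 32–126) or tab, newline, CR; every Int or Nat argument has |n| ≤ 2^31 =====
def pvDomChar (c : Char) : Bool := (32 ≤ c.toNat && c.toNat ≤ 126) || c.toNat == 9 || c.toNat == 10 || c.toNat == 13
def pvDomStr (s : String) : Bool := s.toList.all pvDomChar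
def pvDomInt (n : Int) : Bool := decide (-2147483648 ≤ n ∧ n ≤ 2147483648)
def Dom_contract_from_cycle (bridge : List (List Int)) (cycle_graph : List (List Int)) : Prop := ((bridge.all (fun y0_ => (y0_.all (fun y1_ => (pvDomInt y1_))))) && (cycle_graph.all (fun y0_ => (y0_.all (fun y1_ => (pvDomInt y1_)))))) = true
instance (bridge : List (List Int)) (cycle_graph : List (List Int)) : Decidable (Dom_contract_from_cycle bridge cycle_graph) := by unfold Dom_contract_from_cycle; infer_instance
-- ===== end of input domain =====

-- B replaces A's recursive dfs with an iterative DFS over an explicit stack of neighbour iterators (same cost);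
-- the equivalence is about the RETURN value only (both Pythons leave their arguments unmodified).

-- Needed by runB's termination proof (cited in its decreasing_by), hence stated before the ports.
theorem pv_count_set_true_lt (xs : List Bool) (k : Nat) (hk : k < xs.length)
    (hv : xs[k] = false) : (xs.set k true).count false < xs.count false := by
  have h1 : xs.set k true = xs.take k ++ true :: xs.drop (k + 1) := by
    rw [List.set_eq_take_append_cons_drop]; simp [hk]
  have h2 : xs = xs.take k ++ false :: xs.drop (k + 1) := by
    conv_lhs => rw [← List.take_append_drop k xs]
    rw [← List.getElem_cons_drop (h := hk), hv]
  rw [h1]; conv_rhs => rw [h2]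
  simp [List.count_append]

theorem pv_mark_count_lt (xs : List Bool) (i : Int)
    (h : PySem.List.pyGet? xs i = some false) :
    (PySem.List.pySetD xs i true).count false < xs.count false := by
  unfold PySem.List.pyGet? at h
  cases hidx : PySem.List.pyIdx? xs.length i with
  | none => rw [hidx] at h; simp at h
  | some k =>
    rw [hidx] at h; simp only [Option.bind_some] at h
    obtain ⟨hk, hv⟩ := List.getElem?_eq_some_iff.mp h
    unfold PySem.List.pySetD PySem.List.pySet?
    rw [hidx]
    simpa using pv_count_set_true_lt xs k hk hv

-- ===== PORT A =====
-- A's nested `dfs(u)` = mark u, then run the neighbour loop `for v in cycle_graph[u]: if not visited[v]: dfs(v)`.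
-- goA is that neighbour loop with dfs inlined; state = (visited, vertex_to_group_num).
-- `fuel` is only a totality guard for the recursion depth (A's Python has none); fuel = len(cycle_graph) at each
-- top-level dfs call is proved sufficient (depth is bounded by the number of unvisited vertices).
def goA (g : List (List Int)) (group : Int) :
    Nat → List Int → List Bool × List Int → Option (List Bool × List Int)
  | _, [], st => some st
  | fuel, v :: rest, st =>
    match PySem.List.pyGet? st.1 v with
    | none => none                                   -- visited[v]: IndexError
    | some true => goA g group fuel rest st
    | some false =>
      match fuel with
      | 0 => none
      | f + 1 =>
        -- dfs(v): visited[v] = True; vertex_to_group_num[v] = group; then loop over cycle_graph[v]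
        let st' := (PySem.List.pySetD st.1 v true, PySem.List.pySetD st.2 v group)
        match PySem.List.pyGet? g v with
        | none => none                               -- cycle_graph[v]: IndexError
        | some adj =>
          match goA g group f adj st' with
          | none => none
          | some st'' => goA g group (f + 1) rest st''
  termination_by fuel l _ => (fuel, l.length)

-- the outer `for u in range(n): if not visited[u]: cnt += 1; dfs(u, cnt)`
def outerA (g : List (List Int)) :
    List Int → List Bool × List Int → Int → Option ((List Bool × List Int) × Int)
  | [], st, cnt => some (st, cnt)
  | u :: us, st, cnt =>
    match PySem.List.pyGet? st.1 u with
    | none => none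
    | some true => outerA g us st cnt
    | some false =>
      let st' := (PySem.List.pySetD st.1 u true, PySem.List.pySetD st.2 u (cnt + 1))
      match PySem.List.pyGet? g u with
      | none => none
      | some adj =>
        match goA g (cnt + 1) g.length adj st' with
        | none => none
        | some st'' => outerA g us st'' (cnt + 1)

-- bi_connected[i].append(x)  (shared: the final bridge loop is textually identical in Source A and Source B)
def pvAppendAt (bi : List (List Int)) (i x : Int) : Option (List (List Int)) :=
  match PySem.List.pyGet? bi i with
  | none => none
  | some l => some (PySem.List.pySetD bi i (l ++ [x]))

-- `for u, v in bridge: bi[num[u]].append(num[v]); bi[num[v]].append(num[u])`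
def pvBridgeLoop (labels : List Int) : List (List Int) → List (List Int) → Option (List (List Int))
  | [], bi => some bi
  | row :: rows, bi =>
    match row with
    | [u, v] =>
      match PySem.List.pyGet? labels u, PySem.List.pyGet? labels v with
      | some gu, some gv =>
        match pvAppendAt bi gu gv with
        | none => none
        | some bi1 =>
          match pvAppendAt bi1 gv gu with
          | none => none
          | some bi2 => pvBridgeLoop labels rows bi2
      | _, _ => none
    | _ => none                                      -- `u, v = row` with len(row) ≠ 2: ValueError

def contractACore (bridge : List (List Int)) (cycle_graph : List (List Int)) :
    Option (List Int × List (List Int)) :=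
  match outerA cycle_graph (PySem.List.pyRange 0 (PySem.List.len cycle_graph) 1)
      (List.replicate cycle_graph.length false, List.replicate cycle_graph.length (-1)) (-1) with
  | none => none
  | some (st, cnt) =>
    match pvBridgeLoop st.2 bridge ((PySem.List.pyRange 0 (cnt + 1) 1).map (fun _ => ([] : List Int))) with
    | none => none
    | some bi => some (st.2, bi)

def contract_from_cycle (bridge : List (List Int)) (cycle_graph : List (List Int)) :
    List Int × List (List Int) :=
  (contractACore bridge cycle_graph).getD ([], [])   -- none = the Python raises; Pre_ excludes those inputs

-- ===== PORT B =====
-- B's `while stack: for v in stack[-1]: … break / else: stack.pop()`; the stack holds the not-yet-consumed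
-- remainder of each pushed iterator.  Tail-recursive; terminates by (unvisited count, stack weight).
def runB (g : List (List Int)) (group : Int) :
    List (List Int) → List Bool × List Int → Option (List Bool × List Int)
  | [], st => some st
  | [] :: frames, st => runB g group frames st       -- iterator exhausted: stack.pop()
  | (v :: rest) :: frames, st =>
    match h : PySem.List.pyGet? st.1 v with
    | none => none                                   -- visited[v]: IndexError
    | some true => runB g group (rest :: frames) st
    | some false =>
      match PySem.List.pyGet? g v with
      | none => none                                 -- cycle_graph[v]: IndexError
      | some adj =>
        runB g group (adj :: rest :: frames)
          (PySem.List.pySetD st.1 v true, PySem.List.pySetD st.2 v group)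
  termination_by stack st => (st.1.count false, stack.length + (stack.map List.length).sum)
  decreasing_by
  · apply Prod.Lex.right; simp
  · apply Prod.Lex.right; simp
  · exact Prod.Lex.left _ _ (pv_mark_count_lt st.1 v h)

-- the outer `for s in range(n)` of B: mark the root, push iter(cycle_graph[s]), run the machine
def outerB (g : List (List Int)) :
    List Int → List Bool × List Int → Int → Option ((List Bool × List Int) × Int)
  | [], st, cnt => some (st, cnt)
  | u :: us, st, cnt =>
    match PySem.List.pyGet? st.1 u with
    | none => none
    | some true => outerB g us st cnt
    | some false =>
      let st' := (PySem.List.pySetD st.1 u true, PySem.List.pySetD st.2 u (cnt + 1))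
      match PySem.List.pyGet? g u with
      | none => none
      | some adj =>
        match runB g (cnt + 1) [adj] st' with
        | none => none
        | some st'' => outerB g us st'' (cnt + 1)

def contractBCore (bridge : List (List Int)) (cycle_graph : List (List Int)) :
    Option (List Int × List (List Int)) :=
  match outerB cycle_graph (PySem.List.pyRange 0 (PySem.List.len cycle_graph) 1)
      (List.replicate cycle_graph.length false, List.replicate cycle_graph.length (-1)) (-1) with
  | none => none
  | some (st, cnt) =>
    match pvBridgeLoop st.2 bridge ((PySem.List.pyRange 0 (cnt + 1) 1).map (fun _ => ([] : List Int))) with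
    | none => none
    | some bi => some (st.2, bi)

def contract_from_cycle_alt (bridge : List (List Int)) (cycle_graph : List (List Int)) :
    List Int × List (List Int) :=
  (contractBCore bridge cycle_graph).getD ([], [])

-- ===== PRECONDITION & SPEC =====
-- Pre_ = exactly the inputs where the Python A returns normally: every adjacency entry and every bridge
-- endpoint is a valid (possibly negative) index into the n vertices, and every bridge row has length 2.
-- (The ports agree even outside Pre_; Pre_ only excludes the inputs on which the Pythons raise.)
def Pre_contract_from_cycle (bridge : List (List Int)) (cycle_graph : List (List Int)) : Prop :=
  (∀ l ∈ cycle_graph, ∀ v ∈ l, -(cycle_graph.length : Int) ≤ v ∧ v < cycle_graph.length) ∧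
  (∀ row ∈ bridge, row.length = 2 ∧
    ∀ v ∈ row, -(cycle_graph.length : Int) ≤ v ∧ v < cycle_graph.length)
instance (bridge : List (List Int)) (cycle_graph : List (List Int)) :
    Decidable (Pre_contract_from_cycle bridge cycle_graph) := by
  unfold Pre_contract_from_cycle; infer_instance

def pvWitness_contract_from_cycle : List (List Int) × List (List Int) :=
  ([[0, 1]], [[1], [0], []])

def Spec_contract_from_cycle (bridge : List (List Int)) (cycle_graph : List (List Int)) (out : List Int × List (List Int)) : Prop := out = contract_from_cycle_alt bridge cycle_graph
instance (bridge : List (List Int)) (cycle_graph : List (List Int)) (out : List Int × List (List Int)) : Decidable (Spec_contract_from_cycle bridge cycle_graph out) := by unfold Spec_contract_from_cycle; infer_instance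

-- ===== CLAIM (what is proved, stated in full; the proofs are below) =====
def Claim_equal_contract_from_cycle : Prop := ∀ (bridge : List (List Int)) (cycle_graph : List (List Int)), Dom_contract_from_cycle bridge cycle_graph → Pre_contract_from_cycle bridge cycle_graph → Spec_contract_from_cycle bridge cycle_graph (contract_from_cycle bridge cycle_graph)

-- ===== LEMMAS AND PROOFS =====

theorem pv_mark_count_le (xs : List Bool) (i : Int) :
    (PySem.List.pySetD xs i true).count false ≤ xs.count false := by
  unfold PySem.List.pySetD PySem.List.pySet?
  cases hidx : PySem.List.pyIdx? xs.length i with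
  | none => simp
  | some k =>
    simp only [Option.map_some, Option.getD_some]
    by_cases hk : k < xs.length
    · cases hv : xs[k] with
      | false => exact le_of_lt (pv_count_set_true_lt xs k hk hv)
      | true => rw [← hv, List.set_getElem_self]
    · rw [List.set_eq_of_length_le (by omega)]

-- goA does not grow the unvisited count and preserves the length of both state lists
theorem goA_mono (g : List (List Int)) (group : Int) (fuel : Nat) (l : List Int)
    (st : List Bool × List Int) :
    ∀ st', goA g group fuel l st = some st' →
      st'.1.count false ≤ st.1.count false ∧ st'.1.length = st.1.length ∧
      st'.2.length = st.2.length := by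
  induction fuel, l, st using goA.induct (g := g) (group := group) with
  | case1 x st => intro st' h; rw [goA.eq_def] at h; simp at h; subst h; exact ⟨le_rfl, rfl, rfl⟩
  | case2 fuel v rest st hv => intro st' h; rw [goA.eq_def] at h; simp [hv] at h
  | case3 fuel v rest st hv ih =>
    intro st' h; rw [goA.eq_def] at h; simp only [hv] at h; exact ih st' h
  | case4 v rest st hv => intro st' h; rw [goA.eq_def] at h; simp [hv] at h
  | case5 v rest st hv f hadj => intro st' h; rw [goA.eq_def] at h; simp [hv, hadj] at h
  | case6 v rest st hv f stp adj hadj hrec ih =>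
    intro st' h; rw [goA.eq_def] at h
    have hrec' : goA g group f adj
        (PySem.List.pySetD st.1 v true, PySem.List.pySetD st.2 v group) = none := hrec
    simp [hv, hadj, hrec'] at h
  | case7 v rest st hv f stp adj hadj st'' hrec ih1 ih2 =>
    intro st' h
    rw [goA.eq_def] at h
    have hrec' : goA g group f adj
        (PySem.List.pySetD st.1 v true, PySem.List.pySetD st.2 v group) = some st'' := hrec
    simp only [hv, hadj, hrec'] at h
    obtain ⟨m1, l1, l2⟩ := ih1 st'' hrec
    obtain ⟨m2, l3, l4⟩ := ih2 st' h
    have key : (PySem.List.pySetD st.1 v true).count false ≤ st.1.count false :=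
      pv_mark_count_le _ _
    refine ⟨le_trans m2 (le_trans m1 key), ?_, ?_⟩
    · rw [l3, l1]; exact PySem.List.length_pySetD st.1 v true
    · rw [l4, l2]; exact PySem.List.length_pySetD st.2 v group

-- branch equations for runB (its match binds the scrutinee proof, so plain simp cannot reduce it)
theorem runB_cons_none (g : List (List Int)) (group v : Int) (rest : List Int)
    (frames : List (List Int)) (st : List Bool × List Int)
    (hv : PySem.List.pyGet? st.1 v = none) :
    runB g group ((v :: rest) :: frames) st = none := by
  rw [runB.eq_def]
  split <;> try simp_all
  split <;> simp_all

theorem runB_cons_true (g : List (List Int)) (group v : Int) (rest : List Int)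
    (frames : List (List Int)) (st : List Bool × List Int)
    (hv : PySem.List.pyGet? st.1 v = some true) :
    runB g group ((v :: rest) :: frames) st = runB g group (rest :: frames) st := by
  rw [runB.eq_def]
  split <;> try simp_all
  split <;> simp_all

theorem runB_cons_false (g : List (List Int)) (group v : Int) (rest : List Int)
    (frames : List (List Int)) (st : List Bool × List Int)
    (hv : PySem.List.pyGet? st.1 v = some false) :
    runB g group ((v :: rest) :: frames) st =
      match PySem.List.pyGet? g v with
      | none => none
      | some adj => runB g group (adj :: rest :: frames)
          (PySem.List.pySetD st.1 v true, PySem.List.pySetD st.2 v group) := by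
  rw [runB.eq_def]
  split <;> try simp_all
  split <;> simp_all

-- the simulation: one frame of B's machine runs A's neighbour loop
theorem runB_sim (g : List (List Int)) (group : Int) (fuel : Nat) (l : List Int)
    (st : List Bool × List Int) (hfuel : st.1.count false ≤ fuel) (frames : List (List Int)) :
    runB g group (l :: frames) st =
      (goA g group fuel l st).bind (fun r => runB g group frames r) := by
  induction fuel, l, st using goA.induct (g := g) (group := group) generalizing frames with
  | case1 x st => simp [runB, goA]
  | case2 fuel v rest st hv => rw [runB_cons_none g group v rest frames st hv, goA.eq_def]; simp [hv]
  | case3 fuel v rest st hv ih =>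
    rw [runB_cons_true g group v rest frames st hv, goA.eq_def]
    simp only [hv]
    exact ih hfuel frames
  | case4 v rest st hv =>
    exfalso
    have hmem : false ∈ st.1 := PySem.List.mem_of_pyGet?_eq_some st.1 hv
    have := List.count_pos_iff.mpr hmem
    omega
  | case5 v rest st hv f hadj =>
    rw [runB_cons_false g group v rest frames st hv, goA.eq_def]
    simp [hv, hadj]
  | case6 v rest st hv f stp adj hadj hrec ih =>
    have hlt : (PySem.List.pySetD st.1 v true).count false < st.1.count false :=
      pv_mark_count_lt st.1 v hv
    rw [runB_cons_false g group v rest frames st hv, goA.eq_def]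
    simp only [hv, hadj]
    have hrec' : goA g group f adj
        (PySem.List.pySetD st.1 v true, PySem.List.pySetD st.2 v group) = none := hrec
    rw [ih (Nat.lt_succ_iff.mp (lt_of_lt_of_le hlt hfuel)) (rest :: frames), hrec]
    simp
  | case7 v rest st hv f stp adj hadj st'' hrec ih1 ih2 =>
    have hlt : (PySem.List.pySetD st.1 v true).count false < st.1.count false :=
      pv_mark_count_lt st.1 v hv
    have hcnt : st''.1.count false ≤ f + 1 := by
      have h1 : st''.1.count false ≤ (PySem.List.pySetD st.1 v true).count false :=
        (goA_mono g group f adj stp st'' hrec).1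
      omega
    rw [runB_cons_false g group v rest frames st hv, goA.eq_def]
    simp only [hv, hadj]
    have hrec' : goA g group f adj
        (PySem.List.pySetD st.1 v true, PySem.List.pySetD st.2 v group) = some st'' := hrec
    rw [ih1 (Nat.lt_succ_iff.mp (lt_of_lt_of_le hlt hfuel)) (rest :: frames), hrec]
    simp only [Option.bind]
    exact ih2 hcnt frames

theorem outer_eq (g : List (List Int)) (us : List Int) (st : List Bool × List Int) (cnt : Int)
    (hlen : st.1.length = g.length) :
    outerA g us st cnt = outerB g us st cnt := by
  induction us generalizing st cnt with
  | nil => simp [outerA, outerB]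
  | cons u us ih =>
    rw [outerA.eq_def, outerB.eq_def]
    cases hu : PySem.List.pyGet? st.1 u with
    | none => simp [hu]
    | some b =>
      cases b with
      | true => simpa [hu] using ih st cnt hlen
      | false =>
        simp only [hu]
        cases hadj : PySem.List.pyGet? g u with
        | none => simp
        | some adj =>
          simp only
          have hlen' : (PySem.List.pySetD st.1 u true).length = g.length := by
            rw [PySem.List.length_pySetD]; exact hlen
          have hf : (PySem.List.pySetD st.1 u true).count false ≤ g.length := by
            calc (PySem.List.pySetD st.1 u true).count false
                ≤ (PySem.List.pySetD st.1 u true).length := List.count_le_length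
              _ = g.length := hlen'
          rw [runB_sim g (cnt + 1) g.length adj
                (PySem.List.pySetD st.1 u true, PySem.List.pySetD st.2 u (cnt + 1)) hf []]
          cases hres : goA g (cnt + 1) g.length adj
              (PySem.List.pySetD st.1 u true, PySem.List.pySetD st.2 u (cnt + 1)) with
          | none => simp
          | some st'' =>
            simp only [Option.bind]
            have hlen'' : st''.1.length = g.length := by
              rw [(goA_mono g (cnt + 1) g.length adj _ st'' hres).2.1]; exact hlen'
            simpa [runB] using ih st'' (cnt + 1) hlen''

theorem core_eq (bridge : List (List Int)) (cycle_graph : List (List Int)) :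
    contractACore bridge cycle_graph = contractBCore bridge cycle_graph := by
  unfold contractACore contractBCore
  rw [outer_eq cycle_graph _ _ _ (by simp)]

-- ===== VERDICT (by name: the statement is the Claim_ definition above) =====
theorem contract_from_cycle_spec : Claim_equal_contract_from_cycle := by
  intro bridge cycle_graph _ _
  unfold Spec_contract_from_cycle contract_from_cycle contract_from_cycle_alt
  rw [core_eq]
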